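-- pv_equiv track=rewrite | github.com/carolma630/Big_Data_Tools | ECMA31340exercise1.py | backwardsPrime
-- ===== SOURCE A (Python) =====
-- def backwardsPrime(lb, ub):
--     lst=[]
--
--     for x in range(lb, ub+1):
--         bkwdprime=True
--
--         #determine whether x is a prime number
--
--         for y in range(2, x):
--             if x%y==0:
--                 bkwdprime=False
--                 break
--
--         #if x is a prime number, determine whether the backward of x is not equal to x, if no, determine whether it is a prime number
--         if bkwdprime:
--             digits = len(str(x))
--             bkwd_x = 0
--             for i in range(0, digits):
--                 bkwd_x = bkwd_x + int(str(x)[i]) * 10 ** i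
--
--             if bkwd_x!=x:
--                 for m in range(2, bkwd_x):
--                     if bkwd_x % m == 0:
--                         bkwdprime = False
--                         break
--
--             else:
--                 bkwdprime=False
--
--         if bkwdprime:
--             lst.append(x)
--
--
--     return lst
-- ===== SOURCE B (Python) =====
-- def _is_prime(n):
--     if n < 2:
--         return False
--     d = 2
--     while d * d <= n:
--         if n % d == 0:
--             return False
--         d += 1
--     return True
--
--
-- def backwardsPrime(lb, ub):
--     out = []
--     for x in range(max(lb, 2), ub + 1):
--         r = 0
--         t = x
--         while t:
--             r = r * 10 + t % 10
--             t //= 10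
--         if r != x and _is_prime(x) and _is_prime(r):
--             out.append(x)
--     return out
-- ===== Notes on version B (the rewrite author's own statement) =====
-- stated objective: alternative
-- what changed: B replaces A's full trial division over range(2,x) (run for both x and its reversal) by trial division up to sqrt, computes the reversal arithmetically (r = r*10 + t%10) instead of re-stringifying x for every digit position, and starts the scan at max(lb,2) instead of testing 0 and 1.
import Mathlib
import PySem

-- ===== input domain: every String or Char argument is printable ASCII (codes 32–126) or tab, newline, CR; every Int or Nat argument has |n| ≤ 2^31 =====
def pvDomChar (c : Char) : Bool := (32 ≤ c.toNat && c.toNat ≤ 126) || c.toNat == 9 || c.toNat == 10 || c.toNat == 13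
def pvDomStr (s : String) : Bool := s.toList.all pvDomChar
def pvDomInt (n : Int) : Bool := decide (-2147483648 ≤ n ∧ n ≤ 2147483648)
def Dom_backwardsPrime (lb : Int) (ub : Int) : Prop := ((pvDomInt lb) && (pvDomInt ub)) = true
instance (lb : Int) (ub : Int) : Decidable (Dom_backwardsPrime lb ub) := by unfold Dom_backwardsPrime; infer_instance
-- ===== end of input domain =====

-- B replaces A's full trial division (range(2,x)) by trial division up to sqrt, computes the
-- reversal arithmetically instead of through str(x), and starts at max(lb,2) — objective: alternative.

-- ===== PORT A =====

-- A's flag+break trial-division loop 'for y in range(2, n): if n % y == 0: …'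
-- (true iff a divisor is hit); A runs this same loop for x and for bkwd_x.
def pvTrialA (n : Int) : Bool :=
  (PySem.List.pyRange 2 n 1).any (fun y => PySem.Int.mod n y == 0)

-- int(str(x)[i]): under Pre_ every x seen is ≥ 0, so the index is in range and the
-- character a decimal digit; neither default is reachable there (Python raises on '-').
def pvDigitA (s : String) (i : Int) : Int :=
  match PySem.Str.pyGet? s i with
  | some c => (PySem.Int.ofChars? [c]).getD 0
  | none => 0

-- digits = len(str(x)); bkwd_x = sum of int(str(x)[i]) * 10 ** i
def pvBkwdA (x : Int) : Int :=
  (PySem.List.pyRange 0 (PySem.Str.len (PySem.Int.toStr x)) 1).foldl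
    (fun b i => b + pvDigitA (PySem.Int.toStr x) i * 10 ^ i.toNat) 0

-- the body of A's outer loop: the successive updates of the bkwdprime flag
def pvKeepA (x : Int) : Bool :=
  let bkwdprime := !pvTrialA x
  if bkwdprime then
    let bkwd_x := pvBkwdA x
    if bkwd_x ≠ x then !pvTrialA bkwd_x else false
  else false

def backwardsPrime (lb : Int) (ub : Int) : List Int :=
  (PySem.List.pyRange lb (ub + 1) 1).foldl
    (fun lst x => if pvKeepA x then lst ++ [x] else lst) []

-- ===== PORT B =====

-- 'while d * d <= n: if n % d == 0: return False; d += 1; return True'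
-- (fuel makes the recursion structural; n.toNat + 1 steps always suffice since d starts at 2)
def pvPrimeGoB : Nat → Int → Int → Bool
  | 0, _, _ => true
  | f + 1, n, d =>
    if d * d ≤ n then
      (if PySem.Int.mod n d == 0 then false else pvPrimeGoB f n (d + 1))
    else true

def pvIsPrimeB (n : Int) : Bool :=
  if n < 2 then false else pvPrimeGoB (n.toNat + 1) n 2

-- 'while t: r = r*10 + t%10; t //= 10' (fuel makes it structural; every t reached is ≥ 0
-- and t strictly decreases, so t.toNat + 1 steps suffice)
def pvRevGoB : Nat → Int → Int → Int
  | 0, _, r => r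
  | f + 1, t, r =>
    if 0 < t then pvRevGoB f (PySem.Int.floordiv t 10) (r * 10 + PySem.Int.mod t 10) else r

def pvRevB (x : Int) : Int := pvRevGoB (x.toNat + 1) x 0

def pvKeepB (x : Int) : Bool :=
  let r := pvRevB x
  (r != x) && pvIsPrimeB x && pvIsPrimeB r

def backwardsPrime_alt (lb : Int) (ub : Int) : List Int :=
  (PySem.List.pyRange (max lb 2) (ub + 1) 1).foldl
    (fun out x => if pvKeepB x then out ++ [x] else out) []

-- ===== PRECONDITION & SPEC =====

-- A raises ValueError (int('-')) as soon as a negative x is reached (range(2,x) is empty for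
-- such x, so A treats it as prime and stringifies it); Pre_ excludes exactly those inputs.
def Pre_backwardsPrime (lb : Int) (ub : Int) : Prop := 0 ≤ lb ∨ ub < lb
instance (lb : Int) (ub : Int) : Decidable (Pre_backwardsPrime lb ub) := by
  unfold Pre_backwardsPrime; infer_instance

def pvWitness_backwardsPrime : Int × Int := (0, 50)

def Spec_backwardsPrime (lb : Int) (ub : Int) (out : List Int) : Prop := out = backwardsPrime_alt lb ub
instance (lb : Int) (ub : Int) (out : List Int) : Decidable (Spec_backwardsPrime lb ub out) := by
  unfold Spec_backwardsPrime; infer_instance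

-- ===== CLAIM (what is proved, stated in full; the proofs are below) =====
def Claim_equal_backwardsPrime : Prop := ∀ (lb : Int) (ub : Int), Dom_backwardsPrime lb ub → Pre_backwardsPrime lb ub → Spec_backwardsPrime lb ub (backwardsPrime lb ub)

-- ===== LEMMAS AND PROOFS =====

-- A's trial loop hits a divisor iff one exists in [2, n)
theorem pvTrialA_iff (n : Int) : pvTrialA n = true ↔ ∃ y : Int, 2 ≤ y ∧ y < n ∧ y ∣ n := by
  simp [pvTrialA, List.any_eq_true, PySem.List.mem_pyRange_one, PySem.Int.mod_eq_zero_iff_dvd,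
    and_assoc]

-- B's sqrt loop: with fuel covering the distance, true iff no divisor m ≥ d with m*m ≤ n
theorem pvPrimeGoB_iff (f : Nat) (n : Int) : ∀ (d : Int), 2 ≤ d → n < d + f →
    (pvPrimeGoB f n d = true ↔ ∀ m : Int, d ≤ m → m * m ≤ n → ¬ m ∣ n) := by
  induction f with
  | zero =>
    intro d hd hnf
    simp only [pvPrimeGoB, true_iff]
    intro m hm hmm hdvd
    have h1 : m * 1 ≤ m * m := mul_le_mul_of_nonneg_left (by omega) (by omega)
    simp only [mul_one] at h1
    omega
  | succ f ih =>
    intro d hd hnf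
    by_cases h : d * d ≤ n
    · by_cases hmod : PySem.Int.mod n d = 0
      · simp only [pvPrimeGoB, if_pos h, hmod]
        simp only [BEq.rfl, if_true]
        constructor
        · intro hf; exact absurd hf (by simp)
        · intro hall
          exact absurd ((PySem.Int.mod_eq_zero_iff_dvd n d).mp hmod) (hall d le_rfl h)
      · have hb : (PySem.Int.mod n d == 0) = false := by simp [hmod]
        simp only [pvPrimeGoB, if_pos h, hb, Bool.false_eq_true, if_false]
        rw [ih (d + 1) (by omega) (by omega)]
        constructor
        · intro hall m hm hmm hdvd
          rcases eq_or_lt_of_le hm with rfl | hlt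
          · exact hmod ((PySem.Int.mod_eq_zero_iff_dvd _ _).mpr hdvd)
          · exact hall m (by omega) hmm hdvd
        · intro hall m hm hmm; exact hall m (by omega) hmm
    · simp only [pvPrimeGoB, if_neg h, true_iff]
      intro m hm hmm hdvd
      have h1 : d * d ≤ m * m := mul_le_mul (by omega) (by omega) (by omega) (by omega)
      omega

theorem pvIsPrimeB_iff (n : Int) (hn : 2 ≤ n) : pvIsPrimeB n = true ↔ Nat.Prime n.toNat := by
  unfold pvIsPrimeB
  rw [if_neg (by omega)]
  rw [pvPrimeGoB_iff _ _ _ le_rfl (by omega)]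
  rw [Nat.prime_def_le_sqrt]
  constructor
  · intro hall
    refine ⟨by omega, fun m hm hms hdvd => ?_⟩
    have hmm : m * m ≤ n.toNat := Nat.le_sqrt.mp hms
    refine hall (m : Int) (by omega) (by push_cast; omega) ?_
    have := Int.natCast_dvd_natCast.mpr hdvd
    rwa [Int.toNat_of_nonneg (by omega : (0:Int) ≤ n)] at this
  · rintro ⟨-, hall⟩ m hm hmm hdvd
    have h1 : m.toNat ∣ n.toNat := by
      apply Int.natCast_dvd_natCast.mp
      rw [Int.toNat_of_nonneg (by omega : (0:Int) ≤ m),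
        Int.toNat_of_nonneg (by omega : (0:Int) ≤ n)]
      exact hdvd
    refine hall m.toNat (by omega) (Nat.le_sqrt.mpr ?_) h1
    have : (↑(m.toNat * m.toNat) : Int) ≤ ↑n.toNat := by
      push_cast [Int.toNat_of_nonneg (show (0:Int) ≤ m by omega),
        Int.toNat_of_nonneg (show (0:Int) ≤ n by omega)]
      omega
    exact_mod_cast this

theorem pvTrialA_false_iff (n : Int) (hn : 2 ≤ n) : pvTrialA n = false ↔ Nat.Prime n.toNat := by
  rw [← Bool.not_eq_true, not_iff_comm, iff_comm, pvTrialA_iff, Nat.prime_def_lt]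
  constructor
  · rintro ⟨y, hy2, hyn, hdvd⟩ ⟨-, hall⟩
    have h1 : y.toNat ∣ n.toNat := by
      apply Int.natCast_dvd_natCast.mp
      rw [Int.toNat_of_nonneg (by omega : (0:Int) ≤ y),
        Int.toNat_of_nonneg (by omega : (0:Int) ≤ n)]
      exact hdvd
    have := hall y.toNat (by omega) h1
    omega
  · intro hnp
    by_contra hno
    push_neg at hno
    apply hnp
    refine ⟨by omega, fun m hm hdvd => ?_⟩
    by_contra hm1
    have hm0 : m ≠ 0 := by rintro rfl; simp at hdvd; omega
    have h2 : (m : Int) ∣ n := by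
      have := Int.natCast_dvd_natCast.mpr hdvd
      rwa [Int.toNat_of_nonneg (by omega : (0:Int) ≤ n)] at this
    exact absurd h2 (hno m (by omega) (by omega))

-- digit strings: Nat.toDigits is the reversed digit list (with [0] for 0)
def pvPad (n : Nat) : List Nat := if n = 0 then [0] else Nat.digits 10 n

theorem pvToDigitsCore_eq (f : Nat) : ∀ (n : Nat) (ds : List Char), n < f →
    Nat.toDigitsCore 10 f n ds = ((pvPad n).map Nat.digitChar).reverse ++ ds := by
  induction f with
  | zero => intro n ds h; omega
  | succ f ih =>
    intro n ds h
    rw [Nat.toDigitsCore]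
    by_cases h10 : n / 10 = 0
    · simp only [h10, if_true]
      have hn10 : n < 10 := by omega
      rcases Nat.eq_zero_or_pos n with rfl | hpos
      · simp [pvPad]
      · have : Nat.digits 10 n = [n] := by
          rw [Nat.digits_def' (by norm_num) hpos]
          simp [Nat.div_eq_of_lt hn10, Nat.mod_eq_of_lt hn10]
        simp [pvPad, Nat.pos_iff_ne_zero.mp hpos, this, Nat.mod_eq_of_lt hn10]
    · simp only [h10, if_false]
      have hn : 10 ≤ n := by omega
      rw [ih (n / 10) _ (by omega)]
      have hd : Nat.digits 10 n = n % 10 :: Nat.digits 10 (n / 10) :=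
        Nat.digits_def' (by norm_num) (by omega)
      simp [pvPad, show n ≠ 0 by omega, h10, hd]

theorem pvToDigits_eq (n : Nat) : Nat.toDigits 10 n = ((pvPad n).map Nat.digitChar).reverse := by
  have := pvToDigitsCore_eq (n + 1) n [] (by omega)
  simpa [Nat.toDigits] using this

theorem pvOfChars_digitChar (d : Nat) (hd : d < 10) :
    PySem.Int.ofChars? [Nat.digitChar d] = some (d : Int) := by
  interval_cases d <;> decide

theorem pvSum_ofDigits (M : List Nat) :
    ((List.range M.length).map (fun k => ((M.getD k 0 : Nat) : Int) * 10 ^ k)).sum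
      = ((Nat.ofDigits 10 M : Nat) : Int) := by
  induction M using List.reverseRecOn with
  | nil => simp
  | append_singleton M d ih =>
    rw [List.length_append, List.length_singleton, List.range_succ]
    rw [List.map_append, List.sum_append]
    have h1 : ∀ k ∈ List.range M.length,
        (((M ++ [d]).getD k 0 : Nat) : Int) * 10 ^ k = ((M.getD k 0 : Nat) : Int) * 10 ^ k := by
      intro k hk
      rw [List.mem_range] at hk
      rw [List.getD_append _ _ _ _ hk]
    rw [List.map_congr_left h1, ih]
    have h2 : (M ++ [d]).getD M.length 0 = d := by
      rw [List.getD_append_right _ _ _ _ le_rfl]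
      simp
    rw [Nat.ofDigits_append]
    simp [h2, Nat.ofDigits_singleton]
    push_cast
    ring

theorem pvBkwdA_eq (x : Int) (hx : 0 ≤ x) :
    pvBkwdA x = ((Nat.ofDigits 10 (pvPad x.toNat).reverse : Nat) : Int) := by
  unfold pvBkwdA
  set s := PySem.Int.toStr x with hs
  set M := (pvPad x.toNat).reverse with hM
  have hsl : s.toList = M.map Nat.digitChar := by
    rw [hs, PySem.Int.toList_toStr]
    show PySem.Int.toChars x = _
    unfold PySem.Int.toChars
    rw [if_neg (by omega)]
    rw [pvToDigits_eq, hM, List.map_reverse]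
  have hlen : PySem.Str.len s = (M.length : Int) := by
    rw [PySem.Str.len_eq, hsl]; simp
  rw [hlen, PySem.List.pyRange_zero_natCast, List.foldl_map]
  rw [PySem.List.foldl_add (g := fun k : Nat => pvDigitA s (k : Int) * 10 ^ ((k : Int)).toNat)]
  rw [zero_add]
  have hmem : ∀ d ∈ M, d < 10 := by
    intro d hd
    rw [hM, List.mem_reverse] at hd
    unfold pvPad at hd
    split at hd
    · simp at hd; omega
    · exact Nat.digits_lt_base (by norm_num) hd
  have h1 : ∀ k ∈ List.range M.length,
      pvDigitA s (k : Int) * 10 ^ ((k : Int)).toNat = ((M.getD k 0 : Nat) : Int) * 10 ^ k := by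
    intro k hk
    rw [List.mem_range] at hk
    unfold pvDigitA
    rw [PySem.Str.pyGet?_natCast, hsl]
    rw [List.getElem?_map]
    rw [List.getElem?_eq_getElem hk]
    simp only [Option.map_some]
    have hdk : M[k] < 10 := hmem _ (List.getElem_mem hk)
    rw [pvOfChars_digitChar _ hdk]
    simp [List.getD_eq_getElem?_getD, List.getElem?_eq_getElem hk]
  rw [List.map_congr_left h1, pvSum_ofDigits]

theorem pvRevGoB_eq (f : Nat) : ∀ (t r : Int), 0 ≤ t → t.toNat < f →
    pvRevGoB f t r =
      ((Nat.ofDigits 10 (Nat.digits 10 t.toNat).reverse : Nat) : Int)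
        + r * 10 ^ (Nat.digits 10 t.toNat).length := by
  induction f with
  | zero => intro t r ht hf; omega
  | succ f ih =>
    intro t r ht hf
    rw [pvRevGoB]
    by_cases h0 : 0 < t
    · rw [if_pos h0]
      have hdiv : PySem.Int.floordiv t 10 = ((t.toNat / 10 : Nat) : Int) := by
        show Int.fdiv t 10 = _
        rw [Int.fdiv_eq_ediv]
        simp only [show (0:Int) ≤ 10 by norm_num, true_or, if_true, sub_zero]
        omega
      have hmod : PySem.Int.mod t 10 = ((t.toNat % 10 : Nat) : Int) := by
        show Int.fmod t 10 = _
        rw [Int.fmod_eq_emod]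
        simp only [show (0:Int) ≤ 10 by norm_num, true_or, if_true, add_zero]
        omega
      rw [hdiv, hmod]
      rw [ih _ _ (by positivity) (by omega)]
      have hD : Nat.digits 10 t.toNat = t.toNat % 10 :: Nat.digits 10 (t.toNat / 10) :=
        Nat.digits_def' (by norm_num) (by omega)
      rw [hD]
      simp only [List.reverse_cons, List.length_cons]
      rw [Nat.ofDigits_append, Nat.ofDigits_singleton]
      simp only [Int.toNat_natCast, List.length_reverse]
      push_cast
      ring
    · rw [if_neg h0]
      have : t.toNat = 0 := by omega
      simp [this]

theorem pvBkwd_eq_rev (x : Int) (hx : 0 ≤ x) : pvBkwdA x = pvRevB x := by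
  rw [pvBkwdA_eq x hx]
  unfold pvRevB
  rw [pvRevGoB_eq _ _ _ hx (by omega), zero_mul, add_zero]
  rcases Nat.eq_zero_or_pos x.toNat with h0 | hpos
  · simp [h0, pvPad]
  · rw [pvPad, if_neg (by omega)]

theorem pvOfDigits_eq_zero (l : List Nat) (h : Nat.ofDigits 10 l = 0) : ∀ d ∈ l, d = 0 := by
  induction l with
  | nil => simp
  | cons a l ih =>
    rw [Nat.ofDigits_cons] at h
    have ha : a = 0 := by omega
    have hl : Nat.ofDigits 10 l = 0 := by omega
    intro d hd
    rcases List.mem_cons.mp hd with rfl | hdl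
    · exact ha
    · exact ih hl d hdl

-- the reversal of a prime X that differs from X is itself at least 2
theorem pvRevNat_ge_two (X : Nat) (hX : 2 ≤ X) (hp : Nat.Prime X)
    (hne : Nat.ofDigits 10 (Nat.digits 10 X).reverse ≠ X) :
    2 ≤ Nat.ofDigits 10 (Nat.digits 10 X).reverse := by
  set D := Nat.digits 10 X with hD
  have hDne : D ≠ [] := Nat.digits_ne_nil_iff_ne_zero.mpr (by omega)
  have hsplit : D = D.dropLast ++ [D.getLast hDne] := (List.dropLast_append_getLast hDne).symm
  have hrev : D.reverse = D.getLast hDne :: D.dropLast.reverse := by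
    conv_lhs => rw [hsplit]
    rw [List.reverse_append]
    simp
  have hlast : D.getLast hDne ≠ 0 := Nat.getLast_digit_ne_zero 10 (by omega)
  rw [hrev, Nat.ofDigits_cons]
  by_contra hlt
  push_neg at hlt
  have h1 : D.getLast hDne = 1 ∧ Nat.ofDigits 10 D.dropLast.reverse = 0 := by
    constructor <;> omega
  obtain ⟨hg1, hz⟩ := h1
  rcases Nat.lt_or_ge D.length 2 with hlen | hlen
  · -- single digit: the reversal is X itself, contradicting hne
    have hlen1 : D.length = 1 := by
      rcases Nat.eq_zero_or_pos D.length with h0 | h0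
      · exact absurd (List.length_eq_zero_iff.mp h0) hDne
      · omega
    obtain ⟨d, hd⟩ := List.length_eq_one_iff.mp hlen1
    apply hne
    have hXd : Nat.ofDigits 10 D = X := Nat.ofDigits_digits 10 X
    have hrr : D.reverse = D := by rw [hd]; simp
    rw [hrr, hXd]
  · -- length ≥ 2: then X % 10 = 0, so 2 ∣ X and X prime forces X = 2, a contradiction
    have hd' : D = X % 10 :: Nat.digits 10 (X / 10) := Nat.digits_def' (by norm_num) (by omega)
    have hhead : X % 10 ∈ D.dropLast := by
      rw [hd']
      rw [List.dropLast_cons_of_ne_nil]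
      · exact List.mem_cons_self
      · intro hnil
        rw [hd'] at hlen
        simp [hnil] at hlen
    have : X % 10 = 0 := by
      apply pvOfDigits_eq_zero _ hz
      rwa [List.mem_reverse]
    have h2X : 2 ∣ X := by omega
    have := (Nat.Prime.eq_one_or_self_of_dvd hp 2 h2X).resolve_left (by norm_num)
    omega

theorem pvRev_ge_two (x : Int) (hx : 2 ≤ x) (hp : Nat.Prime x.toNat) (hne : pvRevB x ≠ x) :
    2 ≤ pvRevB x := by
  have hr : pvRevB x = ((Nat.ofDigits 10 (Nat.digits 10 x.toNat).reverse : Nat) : Int) := by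
    unfold pvRevB
    rw [pvRevGoB_eq _ _ _ (by omega) (by omega), zero_mul, add_zero]
  rw [hr]
  have hnatne : Nat.ofDigits 10 (Nat.digits 10 x.toNat).reverse ≠ x.toNat := by
    intro heq
    apply hne
    rw [hr, heq, Int.toNat_of_nonneg (by omega)]
  have := pvRevNat_ge_two x.toNat (by omega) hp hnatne
  omega

theorem pvKeep_eq (x : Int) (hx : 2 ≤ x) : pvKeepA x = pvKeepB x := by
  unfold pvKeepA pvKeepB
  cases htr : pvTrialA x with
  | true =>
    have hnp : ¬ Nat.Prime x.toNat := by
      rw [← pvTrialA_false_iff x hx]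
      simp [htr]
    have hB : pvIsPrimeB x = false := by
      rw [← Bool.not_eq_true, pvIsPrimeB_iff x hx]
      exact hnp
    simp [htr, hB]
  | false =>
    have hp : Nat.Prime x.toNat := (pvTrialA_false_iff x hx).mp htr
    have hA : pvIsPrimeB x = true := (pvIsPrimeB_iff x hx).mpr hp
    have hbr : pvBkwdA x = pvRevB x := pvBkwd_eq_rev x (by omega)
    by_cases hrx : pvRevB x = x
    · simp [htr, hbr, hrx]
    · have hr2 : 2 ≤ pvRevB x := pvRev_ge_two x hx hp hrx
      have hiff : pvTrialA (pvRevB x) = false ↔ pvIsPrimeB (pvRevB x) = true :=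
        (pvTrialA_false_iff _ hr2).trans (pvIsPrimeB_iff _ hr2).symm
      simp only [htr, Bool.not_false, if_true, hbr, hrx, ne_eq, not_false_iff, if_pos, hA,
        bne_iff_ne, Bool.and_true, Bool.true_and]
      cases hb : pvIsPrimeB (pvRevB x) with
      | true =>
        have := hiff.mpr hb
        simp [this, hrx]
      | false =>
        have : ¬ pvTrialA (pvRevB x) = false := fun h => by simp [hiff.mp h] at hb
        simp only [Bool.not_eq_false] at this
        simp [this, hrx]

theorem pvKeepA_zero : pvKeepA 0 = false := by decide
theorem pvKeepA_one : pvKeepA 1 = false := by decide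

theorem pvFilter_eq (a b : Int) (ha : 2 ≤ a) :
    (PySem.List.pyRange a b 1).filter pvKeepA = (PySem.List.pyRange a b 1).filter pvKeepB := by
  apply List.filter_congr
  intro x hx
  rw [PySem.List.mem_pyRange_one] at hx
  exact pvKeep_eq x (by omega)

theorem pvFilter_lo_nil (a b : Int) (ha : 0 ≤ a) (hb : b ≤ 2) :
    (PySem.List.pyRange a b 1).filter pvKeepA = [] := by
  rw [List.filter_eq_nil_iff]
  intro x hx
  rw [PySem.List.mem_pyRange_one] at hx
  have : x = 0 ∨ x = 1 := by omega
  rcases this with rfl | rfl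
  · simp [pvKeepA_zero]
  · simp [pvKeepA_one]

-- ===== VERDICT (by name: the statement is the Claim_ definition above) =====
theorem backwardsPrime_spec : Claim_equal_backwardsPrime := by
  intro lb ub _ hpre
  unfold Spec_backwardsPrime backwardsPrime backwardsPrime_alt
  rw [PySem.List.foldl_append_if_eq_filter, PySem.List.foldl_append_if_eq_filter,
    List.nil_append, List.nil_append]
  rcases hpre with hlb | hub
  · by_cases h2 : 2 ≤ lb
    · rw [show max lb 2 = lb by omega]
      exact pvFilter_eq lb (ub + 1) h2
    · rw [show max lb 2 = 2 by omega]
      by_cases hub2 : ub + 1 ≤ 2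
      · rw [PySem.List.pyRange_one_eq_nil hub2]
        rw [pvFilter_lo_nil lb (ub + 1) hlb hub2]
        simp
      · rw [PySem.List.pyRange_one_append lb 2 (ub + 1) (by omega) (by omega)]
        rw [List.filter_append]
        rw [pvFilter_lo_nil lb 2 hlb le_rfl, List.nil_append]
        exact pvFilter_eq 2 (ub + 1) le_rfl
  · simp [PySem.List.pyRange_one_eq_nil (show ub + 1 ≤ lb by omega),
      PySem.List.pyRange_one_eq_nil (show ub + 1 ≤ max lb 2 by omega)]
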